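-- pv_equiv track=rewrite | github.com/AndNovv/biometry_labs | lab3.2/main.py | matchingPoint
-- ===== SOURCE A (Python) =====
-- def matchingPoint(r, v): #вход: кортеж точек эталона и кортеж проверяемого; выход (совпало, всего)
--     all=0
--     match=0
--     for i in v[0]:
--         # x=range(i[0]-15,i[0]+15)
--         # y=range(i[1]-15,i[1]+15)
--         x=range(i[0]-200,i[0]+200)
--         y=range(i[1]-200,i[1]+200)
--         all+=1
--         for j in r[0]:
--             if j[0] in x and j[1] in y:
--                 match+=1
--                 # break
--
--     for i in v[1]:
--         x=range(i[0]-15,i[0]+15)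
--         y=range(i[1]-15,i[1]+15)
--         # x=range(i[0]-100,i[0]+100)
--         # y=range(i[1]-100,i[1]+100)
--         all+=1
--
--         for j in r[1]:
--             if j[0] in x and j[1] in y:
--                 match+=1
--                 break
--
--     return (match,all)
-- ===== SOURCE B (Python) =====
-- def matchingPoint(r, v):
--     # Spatial hash: bucket reference points into a grid keyed by (x//cell, y//cell),
--     # then each probe point only inspects the few buckets its window can touch.
--     def build(points, cell):
--         d = {}
--         for p in points:
--             k = (p[0] // cell, p[1] // cell)
--             d[k] = d.get(k, []) + [p]
--         return d
--
--     def cells(lo, hi, cell):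
--         return range(lo // cell, hi // cell + 1)
--
--     idx0 = build(r[0], 200)
--     pairs = 0
--     for i in v[0]:
--         for cx in cells(i[0] - 200, i[0] + 199, 200):
--             for cy in cells(i[1] - 200, i[1] + 199, 200):
--                 for j in idx0.get((cx, cy), []):
--                     if i[0] - 200 <= j[0] < i[0] + 200 and i[1] - 200 <= j[1] < i[1] + 200:
--                         pairs += 1
--     idx1 = build(r[1], 15)
--     hits = 0
--     for i in v[1]:
--         if any(i[0] - 15 <= j[0] < i[0] + 15 and i[1] - 15 <= j[1] < i[1] + 15
--                for cx in cells(i[0] - 15, i[0] + 14, 15)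
--                for cy in cells(i[1] - 15, i[1] + 14, 15)
--                for j in idx1.get((cx, cy), [])):
--             hits += 1
--     return (pairs + hits, len(v[0]) + len(v[1]))
-- ===== Notes on version B (the rewrite author's own statement) =====
-- stated objective: faster
-- what changed: B replaces A's all-pairs nested scans with a spatial-hash grid: reference points are bucketed once by (x//cell, y//cell) and each probe point only inspects the at-most-3x3 buckets its window can overlap, counting exact matches there (and testing existence for the second phase).
-- outside the precondition, e.g. on matchingPoint((), ([], [])): A returns (0, 0), B raises IndexError; on matchingPoint(([(0, 0)],), ([(0, 0)], [])): A returns (1, 1), B raises IndexError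
import Mathlib
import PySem

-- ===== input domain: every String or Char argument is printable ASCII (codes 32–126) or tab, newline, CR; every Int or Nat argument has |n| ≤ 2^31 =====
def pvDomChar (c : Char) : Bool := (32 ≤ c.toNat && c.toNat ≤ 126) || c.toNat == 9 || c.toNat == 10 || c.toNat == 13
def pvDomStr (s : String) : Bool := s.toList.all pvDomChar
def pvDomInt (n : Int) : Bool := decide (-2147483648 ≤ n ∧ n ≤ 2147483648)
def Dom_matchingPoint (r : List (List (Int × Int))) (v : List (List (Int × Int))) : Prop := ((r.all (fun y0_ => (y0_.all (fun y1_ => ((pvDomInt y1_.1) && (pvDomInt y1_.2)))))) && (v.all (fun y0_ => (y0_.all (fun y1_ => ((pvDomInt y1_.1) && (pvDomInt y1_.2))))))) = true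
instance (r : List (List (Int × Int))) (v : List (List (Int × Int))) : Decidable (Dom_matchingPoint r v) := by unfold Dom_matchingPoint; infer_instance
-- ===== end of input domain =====

-- B replaces A's all-pairs nested scans by a spatial-hash grid (points bucketed by
-- (x//cell, y//cell); each probe inspects only the <=3x3 buckets its window can touch,
-- expected O(1) work per probe on spread point sets instead of a scan of all references).

-- ===== PORT A =====
-- the inner 'for j in r[1]: if …: match += 1; break' loop of A: 1 on the first hit, else 0
def matchingPointInner2 (i : Int × Int) : List (Int × Int) → Int
  | [] => 0
  | j :: rest =>
    if i.1 - 15 ≤ j.1 ∧ j.1 < i.1 + 15 ∧ i.2 - 15 ≤ j.2 ∧ j.2 < i.2 + 15 then 1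
    else matchingPointInner2 i rest

def matchingPoint (r : List (List (Int × Int))) (v : List (List (Int × Int))) : Int × Int :=
  -- state is (match, all), threaded through both loops as in A
  let s1 : Int × Int := ((PySem.List.pyGet? v 0).getD []).foldl (fun (s : Int × Int) i =>
      let all := s.2 + 1
      let m := ((PySem.List.pyGet? r 0).getD []).foldl (fun m j =>
          if i.1 - 200 ≤ j.1 ∧ j.1 < i.1 + 200 ∧ i.2 - 200 ≤ j.2 ∧ j.2 < i.2 + 200
          then m + 1 else m) s.1
      (m, all)) (0, 0)
  let s2 : Int × Int := ((PySem.List.pyGet? v 1).getD []).foldl (fun (s : Int × Int) i =>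
      (s.1 + matchingPointInner2 i ((PySem.List.pyGet? r 1).getD []), s.2 + 1)) s1
  s2

-- ===== PORT B =====
-- the window tests of Source B, as Bool predicates
def pvQ200 (i j : Int × Int) : Bool :=
  decide (i.1 - 200 ≤ j.1 ∧ j.1 < i.1 + 200 ∧ i.2 - 200 ≤ j.2 ∧ j.2 < i.2 + 200)
def pvQ15 (i j : Int × Int) : Bool :=
  decide (i.1 - 15 ≤ j.1 ∧ j.1 < i.1 + 15 ∧ i.2 - 15 ≤ j.2 ∧ j.2 < i.2 + 15)

-- Source B's grid key (p[0] // cell, p[1] // cell)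
def pvKey (cell : Int) (p : Int × Int) : Int × Int :=
  (PySem.Int.floordiv p.1 cell, PySem.Int.floordiv p.2 cell)

-- Source B's build(points, cell): d[k] = d.get(k, []) + [p]
def pvBuild (points : List (Int × Int)) (cell : Int) :
    PySem.Dict (Int × Int) (List (Int × Int)) :=
  points.foldl (fun d p => d.modify (pvKey cell p) [] (· ++ [p])) PySem.Dict.empty

-- Source B's cells(lo, hi, cell) = range(lo // cell, hi // cell + 1)
def pvCells (lo hi cell : Int) : List Int :=
  PySem.List.pyRange (PySem.Int.floordiv lo cell) (PySem.Int.floordiv hi cell + 1) 1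

def matchingPoint_alt (r : List (List (Int × Int))) (v : List (List (Int × Int))) : Int × Int :=
  let r0 := (PySem.List.pyGet? r 0).getD []
  let r1 := (PySem.List.pyGet? r 1).getD []
  let v0 := (PySem.List.pyGet? v 0).getD []
  let v1 := (PySem.List.pyGet? v 1).getD []
  let idx0 := pvBuild r0 200
  let pairs : Int := v0.foldl (fun acc i =>
    (pvCells (i.1 - 200) (i.1 + 199) 200).foldl (fun acc cx =>
      (pvCells (i.2 - 200) (i.2 + 199) 200).foldl (fun acc cy =>
        (idx0.getD (cx, cy) []).foldl (fun acc j =>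
          if pvQ200 i j then acc + 1 else acc) acc) acc) acc) 0
  let idx1 := pvBuild r1 15
  let hits : Int := v1.foldl (fun acc i =>
    if (pvCells (i.1 - 15) (i.1 + 14) 15).any (fun cx =>
        (pvCells (i.2 - 15) (i.2 + 14) 15).any (fun cy =>
          (idx1.getD (cx, cy) []).any (fun j => pvQ15 i j)))
    then acc + 1 else acc) 0
  (pairs + hits, (v0.length : Int) + (v1.length : Int))

-- ===== PRECONDITION & SPEC =====
-- Pre_ excludes inputs where r or v has fewer than two rows: there B's unconditional
-- unpacking of r[0], r[1], v[0], v[1] raises IndexError, while A raises too except in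
-- degenerate cases where the probe rows it still reaches are empty.
def Pre_matchingPoint (r : List (List (Int × Int))) (v : List (List (Int × Int))) : Prop :=
  2 ≤ r.length ∧ 2 ≤ v.length
instance (r : List (List (Int × Int))) (v : List (List (Int × Int))) : Decidable (Pre_matchingPoint r v) := by unfold Pre_matchingPoint; infer_instance
def pvWitness_matchingPoint : (List (List (Int × Int))) × (List (List (Int × Int))) :=
  ([[(0, 0)], [(3, 4)]], [[(1, 1)], [(5, 5)]])

def Spec_matchingPoint (r : List (List (Int × Int))) (v : List (List (Int × Int))) (out : Int × Int) : Prop := out = matchingPoint_alt r v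
instance (r : List (List (Int × Int))) (v : List (List (Int × Int))) (out : Int × Int) : Decidable (Spec_matchingPoint r v out) := by unfold Spec_matchingPoint; infer_instance

-- ===== CLAIM (what is proved, stated in full; the proofs are below) =====
def Claim_equal_matchingPoint : Prop := ∀ (r : List (List (Int × Int))) (v : List (List (Int × Int))), Dom_matchingPoint r v → Pre_matchingPoint r v → Spec_matchingPoint r v (matchingPoint r v)

-- ===== LEMMAS AND PROOFS =====

-- ---- A side: both phases reduced to countP / any ----
theorem pv_inner1 (i : Int × Int) (r0 : List (Int × Int)) (m : Int) :
    r0.foldl (fun m j =>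
        if i.1 - 200 ≤ j.1 ∧ j.1 < i.1 + 200 ∧ i.2 - 200 ≤ j.2 ∧ j.2 < i.2 + 200
        then m + 1 else m) m
      = m + (r0.countP (pvQ200 i) : Int) := by
  induction r0 generalizing m with
  | nil => simp
  | cons j t ih =>
      rw [List.foldl_cons, ih, List.countP_cons]
      simp only [pvQ200, decide_eq_true_eq]
      split_ifs with h <;> push_cast <;> ring

theorem pv_phase1 (r0 : List (Int × Int)) (v0 : List (Int × Int)) (s : Int × Int) :
    v0.foldl (fun (s : Int × Int) i =>
        let all := s.2 + 1
        let m := r0.foldl (fun m j =>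
            if i.1 - 200 ≤ j.1 ∧ j.1 < i.1 + 200 ∧ i.2 - 200 ≤ j.2 ∧ j.2 < i.2 + 200
            then m + 1 else m) s.1
        (m, all)) s
      = (s.1 + ((v0.map (fun i => r0.countP (pvQ200 i))).sum : Int), s.2 + (v0.length : Int)) := by
  induction v0 generalizing s with
  | nil => simp
  | cons i t ih =>
      rw [List.foldl_cons, ih]
      simp only [pv_inner1, List.map_cons, List.sum_cons, List.length_cons, Prod.mk.injEq]
      constructor <;> push_cast <;> ring

theorem pv_inner2 (i : Int × Int) (r1 : List (Int × Int)) :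
    matchingPointInner2 i r1 = if r1.any (pvQ15 i) then 1 else 0 := by
  induction r1 with
  | nil => simp [matchingPointInner2]
  | cons j t ih =>
      rw [matchingPointInner2, ih]
      simp only [List.any_cons, pvQ15, Bool.or_eq_true, decide_eq_true_eq]
      split_ifs <;> tauto

theorem pv_phase2 (r1 : List (Int × Int)) (v1 : List (Int × Int)) (s : Int × Int) :
    v1.foldl (fun (s : Int × Int) i =>
        (s.1 + matchingPointInner2 i r1, s.2 + 1)) s
      = (s.1 + (v1.countP (fun i => r1.any (pvQ15 i)) : Int), s.2 + (v1.length : Int)) := by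
  induction v1 generalizing s with
  | nil => simp
  | cons i t ih =>
      rw [List.foldl_cons, ih]
      simp only [pv_inner2, List.countP_cons, List.length_cons, Prod.mk.injEq]
      by_cases h : r1.any (pvQ15 i) = true <;> simp [h] <;> omega

-- ---- B side: the grid index ----

-- a bucket of the grid holds exactly the points with that key, in input order
theorem pv_bucket (l : List (Int × Int)) (cell : Int) (k : Int × Int) :
    (pvBuild l cell).getD k [] = l.filter (fun p => pvKey cell p == k) := by
  unfold pvBuild
  have : l.foldl (fun d p => d.modify (pvKey cell p) [] (· ++ [p])) PySem.Dict.empty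
      = (l.map (fun p => (pvKey cell p, p))).foldl
          (fun d q => d.modify q.1 [] (· ++ [q.2])) PySem.Dict.empty := by
    rw [List.foldl_map]
  rw [this, PySem.Dict.getD_foldl_modify_append, List.filter_map]
  simp [List.map_map, Function.comp_def]

-- Nat-valued 0/1 indicator sum = countP
theorem pv_countP_eq_sum {α : Type} (p : α → Bool) (l : List α) :
    l.countP p = (l.map (fun x => if p x then 1 else 0)).sum := by
  induction l with
  | nil => simp
  | cons a t ih => simp [List.countP_cons, ih]; split <;> omega

-- partition counting: summing a condition over buckets indexed by a Nodup key list
-- that covers every satisfying point recovers the plain count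
theorem pv_sum_countP (K : List (Int × Int)) (hK : K.Nodup)
    (cond : (Int × Int) → Bool) (key : (Int × Int) → Int × Int)
    (hcov : ∀ p, cond p = true → key p ∈ K) (l : List (Int × Int)) :
    (K.map (fun k => l.countP (fun p => cond p && (key p == k)))).sum = l.countP cond := by
  induction l with
  | nil => simp
  | cons p t ih =>
      simp only [List.countP_cons]
      rw [show (fun k => t.countP (fun q => cond q && (key q == k)) +
              if cond p && (key p == k) then 1 else 0)
            = fun k => t.countP (fun q => cond q && (key q == k)) +
              if cond p && (key p == k) then 1 else 0 from rfl]
      rw [List.sum_map_add, ih]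
      by_cases hc : cond p = true
      · have h1 : (K.map (fun k => if cond p && (key p == k) then 1 else 0)).sum
            = K.countP (fun k => key p == k) := by
          rw [pv_countP_eq_sum]
          exact congrArg List.sum (List.map_congr_left fun k _ => by simp [hc])
        have h2 : K.countP (fun k => key p == k) = K.count (key p) := by
          rw [List.count_eq_countP]
          apply List.countP_congr
          intro k _
          simp only [beq_iff_eq]
          exact eq_comm
        rw [h1, h2, List.count_eq_one_of_mem hK (hcov p hc), hc]
        simp
      · have hc' : cond p = false := by simpa using hc
        simp [hc']

-- double iteration over cells = iteration over the product of cell lists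
theorem pv_sum_product (X Y : List Int) (h : Int × Int → Nat) :
    ((X ×ˢ Y).map h).sum = (X.map (fun cx => (Y.map (fun cy => h (cx, cy))).sum)).sum := by
  induction X with
  | nil => simp
  | cons a t ih => simp [List.product_cons, ih, List.map_map, Function.comp_def]

-- coverage: a point inside the ±w window has its cell among the candidate cells
theorem pv_cover (w c lo x : Int) (hc : 0 < c) (h1 : lo ≤ x) (h2 : x < lo + 2 * w) :
    PySem.Int.floordiv x c ∈ pvCells lo (lo + 2 * w - 1) c := by
  unfold pvCells
  rw [PySem.List.mem_pyRange_one]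
  rw [PySem.Int.floordiv_eq_ediv_of_pos hc, PySem.Int.floordiv_eq_ediv_of_pos hc,
      PySem.Int.floordiv_eq_ediv_of_pos hc]
  constructor
  · exact Int.ediv_le_ediv hc h1
  · have : x ≤ lo + 2 * w - 1 := by omega
    have := Int.ediv_le_ediv hc this
    omega

-- candidate cell pairs are distinct
theorem pv_cells_nodup (a b a' b' c : Int) : ((pvCells a b c) ×ˢ (pvCells a' b' c)).Nodup :=
  List.Nodup.product (by unfold pvCells; exact PySem.List.nodup_pyRange_one _ _)
    (by unfold pvCells; exact PySem.List.nodup_pyRange_one _ _)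

-- the grid count over candidate cells equals the plain count (Nat level)
theorem pv_grid_count (i : Int × Int) (w c : Int) (hc : 0 < c) (cond : (Int × Int) → Bool)
    (hcond : ∀ j, cond j = true →
      (i.1 - w ≤ j.1 ∧ j.1 < i.1 - w + 2 * w) ∧ (i.2 - w ≤ j.2 ∧ j.2 < i.2 - w + 2 * w))
    (r0 : List (Int × Int)) :
    ((pvCells (i.1 - w) (i.1 - w + 2 * w - 1) c).map (fun cx =>
      ((pvCells (i.2 - w) (i.2 - w + 2 * w - 1) c).map (fun cy =>
        (r0.filter (fun p => pvKey c p == (cx, cy))).countP cond)).sum)).sum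
    = r0.countP cond := by
  have hfil : ∀ cx cy, (r0.filter (fun p => pvKey c p == (cx, cy))).countP cond
      = r0.countP (fun p => cond p && (pvKey c p == (cx, cy))) := by
    intro cx cy
    rw [List.countP_filter]
  simp only [hfil]
  rw [← pv_sum_product (pvCells (i.1 - w) (i.1 - w + 2 * w - 1) c)
        (pvCells (i.2 - w) (i.2 - w + 2 * w - 1) c)
        (fun k => r0.countP (fun p => cond p && (pvKey c p == k)))]
  exact pv_sum_countP _ (pv_cells_nodup _ _ _ _ _) cond (pvKey c)
    (fun p hp => by
      have h := hcond p hp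
      rcases h with ⟨⟨h1, h2⟩, ⟨h3, h4⟩⟩
      rw [List.mem_product]
      exact ⟨pv_cover w c (i.1 - w) p.1 hc h1 h2, pv_cover w c (i.2 - w) p.2 hc h3 h4⟩)
    r0

-- casts pushed through the double cell sum
theorem pv_cast_sum2 (X Y : List Int) (f : Int → Int → Nat) :
    (X.map (fun cx => (Y.map (fun cy => (f cx cy : Int))).sum)).sum
      = ((X.map (fun cx => (Y.map (fun cy => f cx cy)).sum)).sum : Int) := by
  induction X with
  | nil => simp
  | cons a t ih =>
      rw [List.map_cons, List.map_cons, List.sum_cons, List.sum_cons, ih, Nat.cast_add]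
      congr 1
      rw [Nat.cast_list_sum, List.map_map]
      rfl

-- the pairs loop of B for one probe point adds the plain count
theorem pv_alt_inner (i : Int × Int) (r0 : List (Int × Int)) (acc : Int) :
    (pvCells (i.1 - 200) (i.1 + 199) 200).foldl (fun acc cx =>
      (pvCells (i.2 - 200) (i.2 + 199) 200).foldl (fun acc cy =>
        ((pvBuild r0 200).getD (cx, cy) []).foldl (fun acc j =>
          if pvQ200 i j then acc + 1 else acc) acc) acc) acc
    = acc + (r0.countP (pvQ200 i) : Int) := by
  simp only [PySem.List.foldl_count_if, pv_bucket, PySem.List.foldl_add]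
  have hx : i.1 + 199 = i.1 - 200 + 2 * 200 - 1 := by ring
  have hy : i.2 + 199 = i.2 - 200 + 2 * 200 - 1 := by ring
  rw [hx, hy]
  have := pv_grid_count i 200 200 (by norm_num) (pvQ200 i)
    (fun j hj => by
      simp only [pvQ200, decide_eq_true_eq] at hj
      constructor <;> constructor <;> omega) r0
  rw [pv_cast_sum2 (pvCells (i.1 - 200) (i.1 - 200 + 2 * 200 - 1) 200)
        (pvCells (i.2 - 200) (i.2 - 200 + 2 * 200 - 1) 200)
        (fun cx cy => (r0.filter (fun p => pvKey 200 p == (cx, cy))).countP (pvQ200 i)), this]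

-- the existence test of B over candidate buckets = existence over the whole list
theorem pv_alt_any (i : Int × Int) (r1 : List (Int × Int)) :
    ((pvCells (i.1 - 15) (i.1 + 14) 15).any (fun cx =>
      (pvCells (i.2 - 15) (i.2 + 14) 15).any (fun cy =>
        ((pvBuild r1 15).getD (cx, cy) []).any (fun j => pvQ15 i j))))
    = r1.any (pvQ15 i) := by
  simp only [pv_bucket]
  rw [Bool.eq_iff_iff]
  simp only [List.any_eq_true, List.mem_filter]
  constructor
  · rintro ⟨cx, -, cy, -, j, ⟨hjm, -⟩, hq⟩
    exact ⟨j, hjm, hq⟩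
  · rintro ⟨j, hjm, hjq⟩
    have hcov : (i.1 - 15 ≤ j.1 ∧ j.1 < i.1 - 15 + 2 * 15)
        ∧ (i.2 - 15 ≤ j.2 ∧ j.2 < i.2 - 15 + 2 * 15) := by
      have hq := hjq
      simp only [pvQ15, decide_eq_true_eq] at hq
      constructor <;> constructor <;> omega
    obtain ⟨⟨h1, h2⟩, ⟨h3, h4⟩⟩ := hcov
    refine ⟨PySem.Int.floordiv j.1 15, ?_, PySem.Int.floordiv j.2 15, ?_, j, ?_, hjq⟩
    · have h5 := pv_cover 15 15 (i.1 - 15) j.1 (by norm_num) h1 h2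
      rw [show i.1 - 15 + 2 * 15 - 1 = i.1 + 14 from by ring] at h5
      exact h5
    · have h5 := pv_cover 15 15 (i.2 - 15) j.2 (by norm_num) h3 h4
      rw [show i.2 - 15 + 2 * 15 - 1 = i.2 + 14 from by ring] at h5
      exact h5
    · exact ⟨hjm, by simp [pvKey]⟩

-- ===== VERDICT (by name: the statement is the Claim_ definition above) =====
theorem matchingPoint_spec : Claim_equal_matchingPoint := by
  intro r v _ hpre
  show Spec_matchingPoint _ _ _
  unfold Spec_matchingPoint
  show matchingPoint r v = matchingPoint_alt r v
  simp only [matchingPoint, matchingPoint_alt]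
  rw [pv_phase1, pv_phase2]
  set r0 := (PySem.List.pyGet? r 0).getD [] with hr0
  set r1 := (PySem.List.pyGet? r 1).getD [] with hr1
  set v0 := (PySem.List.pyGet? v 0).getD [] with hv0
  set v1 := (PySem.List.pyGet? v 1).getD [] with hv1
  have hpairs : v0.foldl (fun acc i =>
      (pvCells (i.1 - 200) (i.1 + 199) 200).foldl (fun acc cx =>
        (pvCells (i.2 - 200) (i.2 + 199) 200).foldl (fun acc cy =>
          ((pvBuild r0 200).getD (cx, cy) []).foldl (fun acc j =>
            if pvQ200 i j then acc + 1 else acc) acc) acc) acc) 0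
      = ((v0.map (fun i => r0.countP (pvQ200 i))).sum : Int) := by
    have : ∀ (acc : Int), v0.foldl (fun acc i =>
        (pvCells (i.1 - 200) (i.1 + 199) 200).foldl (fun acc cx =>
          (pvCells (i.2 - 200) (i.2 + 199) 200).foldl (fun acc cy =>
            ((pvBuild r0 200).getD (cx, cy) []).foldl (fun acc j =>
              if pvQ200 i j then acc + 1 else acc) acc) acc) acc) acc
        = acc + ((v0.map (fun i => r0.countP (pvQ200 i))).sum : Int) := by
      induction v0 with
      | nil => simp
      | cons i t ih =>
          intro acc
          rw [List.foldl_cons, pv_alt_inner, ih]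
          simp only [List.map_cons, List.sum_cons]
          push_cast
          ring
    simpa using this 0
  have hhits : v1.foldl (fun acc i =>
      if (pvCells (i.1 - 15) (i.1 + 14) 15).any (fun cx =>
          (pvCells (i.2 - 15) (i.2 + 14) 15).any (fun cy =>
            ((pvBuild r1 15).getD (cx, cy) []).any (fun j => pvQ15 i j)))
      then acc + 1 else acc) 0
      = (v1.countP (fun i => r1.any (pvQ15 i)) : Int) := by
    rw [PySem.List.foldl_count_if]
    simp only [pv_alt_any, zero_add]
  simp only [hpairs, hhits, Prod.mk.injEq]
  constructor
  · ring
  · ring
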